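-- pv_equiv track=rewrite | github.com/yuxin101/skills | skills/kiwifruit13/memory-and-context-engineering/scripts/causal_chain_extractor.py | _are_adjacent
-- ===== SOURCE A (Python) =====
-- def _are_adjacent(text1: str, text2: str, sentences: list[str]) -> bool:
--     """检查两段文本是否相邻"""
--     for i, sentence in enumerate(sentences):
--         if text1 in sentence.lower():
--             if i > 0 and text2 in sentences[i - 1].lower():
--                 return True
--             if i < len(sentences) - 1 and text2 in sentences[i + 1].lower():
--                 return True
--     return False
-- ===== SOURCE B (Python) =====
-- def _are_adjacent(text1: str, text2: str, sentences: list[str]) -> bool: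
--     """Two passes build position indexes; adjacency is then a set-membership test."""
--     t1 = [i for i, s in enumerate(sentences) if text1 in s.lower()]
--     t2 = {i for i, s in enumerate(sentences) if text2 in s.lower()}
--     return any((i - 1) in t2 or (i + 1) in t2 for i in t1)
-- ===== Notes on version B (the rewrite author's own statement) =====
-- stated objective: alternative
-- what changed: Replaces the single interleaved scan with neighbor peeking by two index-building passes (positions of text1 as a list, positions of text2 as a set) followed by an adjacency membership test over the set.
import Mathlib
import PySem

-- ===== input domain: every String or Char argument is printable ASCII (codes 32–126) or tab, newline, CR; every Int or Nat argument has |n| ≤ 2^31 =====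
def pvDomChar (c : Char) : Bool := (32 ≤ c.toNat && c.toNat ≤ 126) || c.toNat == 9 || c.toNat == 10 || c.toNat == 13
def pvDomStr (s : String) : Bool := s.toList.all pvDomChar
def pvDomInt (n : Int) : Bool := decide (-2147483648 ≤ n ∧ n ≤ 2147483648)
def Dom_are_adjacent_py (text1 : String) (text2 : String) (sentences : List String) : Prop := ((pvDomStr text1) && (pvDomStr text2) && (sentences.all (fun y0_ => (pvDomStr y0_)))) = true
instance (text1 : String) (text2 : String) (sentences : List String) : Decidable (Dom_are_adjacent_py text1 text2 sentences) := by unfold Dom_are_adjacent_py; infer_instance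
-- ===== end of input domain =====

-- B replaces A's single interleaved scan (with neighbor peeking) by two index-building
-- passes and an adjacency membership test over a set of positions (objective: alternative).

-- ===== PORT A =====
-- A's for-loop over enumerate(sentences) with early return; i counts the position,
-- `sentences` stays available for the sentences[i-1] / sentences[i+1] peeks (guarded in range).
def areAdjacentGoA (text1 : String) (text2 : String) (sentences : List String) (i : Nat) : List String → Bool
  | [] => false
  | s :: rest =>
    if PySem.Str.isIn text1 (PySem.Str.lower s) then
      if decide (0 < i) && PySem.Str.isIn text2 (PySem.Str.lower (sentences.getD (i - 1) "")) then
        true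
      else if decide (i < sentences.length - 1) && PySem.Str.isIn text2 (PySem.Str.lower (sentences.getD (i + 1) "")) then
        true
      else areAdjacentGoA text1 text2 sentences (i + 1) rest
    else areAdjacentGoA text1 text2 sentences (i + 1) rest

def are_adjacent_py (text1 : String) (text2 : String) (sentences : List String) : Bool :=
  areAdjacentGoA text1 text2 sentences 0 sentences

-- ===== PORT B =====
def are_adjacent_py_alt (text1 : String) (text2 : String) (sentences : List String) : Bool :=
  let t1 : List Int :=
    ((PySem.List.enumerate sentences).filter
      (fun p => PySem.Str.isIn text1 (PySem.Str.lower p.2))).map Prod.fst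
  let t2 : PySem.Set Int :=
    PySem.Set.ofList (((PySem.List.enumerate sentences).filter
      (fun p => PySem.Str.isIn text2 (PySem.Str.lower p.2))).map Prod.fst)
  t1.any (fun i => t2.contains (i - 1) || t2.contains (i + 1))

-- ===== PRECONDITION & SPEC =====
def Spec_are_adjacent_py (text1 : String) (text2 : String) (sentences : List String) (out : Bool) : Prop := out = are_adjacent_py_alt text1 text2 sentences
instance (text1 : String) (text2 : String) (sentences : List String) (out : Bool) : Decidable (Spec_are_adjacent_py text1 text2 sentences out) := by unfold Spec_are_adjacent_py; infer_instance

-- ===== CLAIM (what is proved, stated in full; the proofs are below) =====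
def Claim_equal_are_adjacent_py : Prop := ∀ (text1 : String) (text2 : String) (sentences : List String), Dom_are_adjacent_py text1 text2 sentences → Spec_are_adjacent_py text1 text2 sentences (are_adjacent_py text1 text2 sentences)

-- ===== LEMMAS AND PROOFS =====

-- x belongs to B's text2 index list iff x is a valid position whose sentence matches text2
lemma mem_t2_iff (text2 : String) (sentences : List String) (x : Int) :
    (x ∈ ((PySem.List.enumerate sentences).filter
        (fun p => PySem.Str.isIn text2 (PySem.Str.lower p.2))).map Prod.fst) ↔
    ∃ k : Nat, k < sentences.length ∧ x = (k : Int) ∧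
      PySem.Str.isIn text2 (PySem.Str.lower sentences[k]!) = true := by
  simp only [List.mem_map, List.mem_filter, PySem.List.mem_enumerate_iff]
  constructor
  · rintro ⟨p, ⟨⟨k, hk, rfl⟩, hm⟩, rfl⟩
    exact ⟨k, hk, by simp, by simpa [getElem!_pos, hk] using hm⟩
  · rintro ⟨k, hk, rfl, hm⟩
    exact ⟨((k : Int), sentences[k]), ⟨⟨k, hk, by simp⟩,
      by simpa [getElem!_pos, hk] using hm⟩, rfl⟩

lemma contains_t2_left (text2 : String) (sentences : List String) (i : Nat)
    (hin : i < sentences.length) :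
    (PySem.Set.ofList (((PySem.List.enumerate sentences).filter
        (fun p => PySem.Str.isIn text2 (PySem.Str.lower p.2))).map Prod.fst)).contains ((i : Int) - 1)
    = (decide (0 < i) && PySem.Str.isIn text2 (PySem.Str.lower (sentences.getD (i - 1) ""))) := by
  rcases Bool.eq_false_or_eq_true (b := (decide (0 < i) && PySem.Str.isIn text2 (PySem.Str.lower (sentences.getD (i - 1) "")))) with h | h
  · rw [h]
    rw [Bool.and_eq_true] at h
    obtain ⟨h1, h2⟩ := h
    have hi : 0 < i := by simpa using h1
    have hk : i - 1 < sentences.length := by omega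
    rw [PySem.Set.contains_iff, PySem.Set.mem_ofList, mem_t2_iff]
    refine ⟨i - 1, hk, by omega, ?_⟩
    rw [getElem!_pos sentences (i - 1) hk]
    rw [List.getD_eq_getElem?_getD, List.getElem?_eq_getElem hk] at h2
    simpa using h2
  · rw [h, Bool.eq_false_iff]
    intro hc
    rw [PySem.Set.contains_iff, PySem.Set.mem_ofList, mem_t2_iff] at hc
    obtain ⟨k, hk, hx, hm⟩ := hc
    have hi : 0 < i := by omega
    have hki : k = i - 1 := by omega
    subst hki
    rw [Bool.and_eq_false_iff] at h
    rcases h with h | h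
    · simp [hi] at h
    · rw [List.getD_eq_getElem?_getD, List.getElem?_eq_getElem hk] at h
      rw [getElem!_pos sentences (i - 1) hk] at hm
      simp only [PySem.Str.isIn_eq, PySem.Str.toList_lower] at hm
      simp [hm] at h

lemma contains_t2_right (text2 : String) (sentences : List String) (i : Nat) :
    (PySem.Set.ofList (((PySem.List.enumerate sentences).filter
        (fun p => PySem.Str.isIn text2 (PySem.Str.lower p.2))).map Prod.fst)).contains ((i : Int) + 1)
    = (decide (i < sentences.length - 1) && PySem.Str.isIn text2 (PySem.Str.lower (sentences.getD (i + 1) ""))) := by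
  rcases Bool.eq_false_or_eq_true (b := (decide (i < sentences.length - 1) && PySem.Str.isIn text2 (PySem.Str.lower (sentences.getD (i + 1) "")))) with h | h
  · rw [h]
    rw [Bool.and_eq_true] at h
    obtain ⟨h1, h2⟩ := h
    have hk : i + 1 < sentences.length := by
      have := of_decide_eq_true h1; omega
    rw [PySem.Set.contains_iff, PySem.Set.mem_ofList, mem_t2_iff]
    refine ⟨i + 1, hk, by omega, ?_⟩
    rw [getElem!_pos sentences (i + 1) hk]
    rw [List.getD_eq_getElem?_getD, List.getElem?_eq_getElem hk] at h2
    simpa using h2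
  · rw [h, Bool.eq_false_iff]
    intro hc
    rw [PySem.Set.contains_iff, PySem.Set.mem_ofList, mem_t2_iff] at hc
    obtain ⟨k, hk, hx, hm⟩ := hc
    have hki : k = i + 1 := by omega
    subst hki
    rw [Bool.and_eq_false_iff] at h
    rcases h with h | h
    · have hlt : i < sentences.length - 1 := by omega
      simp [hlt] at h
    · rw [List.getD_eq_getElem?_getD, List.getElem?_eq_getElem hk] at h
      rw [getElem!_pos sentences (i + 1) hk] at hm
      simp only [PySem.Str.isIn_eq, PySem.Str.toList_lower] at hm
      simp [hm] at h

lemma ite_adj_shape (c a b r : Bool) :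
    (if c = true then if a = true then true else if b = true then true else r else r)
      = (c && (a || b) || r) := by
  cases c <;> cases a <;> cases b <;> cases r <;> rfl

-- A's scan from position i over the remaining sentences equals B's per-position test
lemma goA_eq (text1 text2 : String) (sentences : List String) :
    ∀ (l : List String) (i : Nat), sentences.drop i = l →
    areAdjacentGoA text1 text2 sentences i l =
      (PySem.List.enumerate l (i : Int)).any (fun p =>
        PySem.Str.isIn text1 (PySem.Str.lower p.2) &&
          ((PySem.Set.ofList (((PySem.List.enumerate sentences).filter
              (fun q => PySem.Str.isIn text2 (PySem.Str.lower q.2))).map Prod.fst)).contains (p.1 - 1) ||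
           (PySem.Set.ofList (((PySem.List.enumerate sentences).filter
              (fun q => PySem.Str.isIn text2 (PySem.Str.lower q.2))).map Prod.fst)).contains (p.1 + 1))) := by
  intro l
  induction l with
  | nil => intro i _; simp [areAdjacentGoA, PySem.List.enumerate]
  | cons s rest ih =>
    intro i hdrop
    have hin : i < sentences.length := by
      by_contra hge
      rw [List.drop_eq_nil_of_le (by omega)] at hdrop
      simp at hdrop
    have hrest : sentences.drop (i + 1) = rest := by
      have h1 : sentences.drop (i + 1) = (sentences.drop i).drop 1 := by
        rw [List.drop_drop]
      rw [h1, hdrop]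
      rfl
    have ihr := ih (i + 1) hrest
    rw [show ((i + 1 : Nat) : Int) = (i : Int) + 1 by push_cast; ring] at ihr
    rw [areAdjacentGoA, PySem.List.enumerate_cons, List.any_cons]
    dsimp only
    rw [← ihr]
    rw [contains_t2_left text2 sentences i hin, contains_t2_right text2 sentences i]
    exact ite_adj_shape _ _ _ _

-- B's port unfolded to the per-position test over enumerate
lemma alt_eq (text1 text2 : String) (sentences : List String) :
    are_adjacent_py_alt text1 text2 sentences =
      (PySem.List.enumerate sentences (0 : Int)).any (fun p =>
        PySem.Str.isIn text1 (PySem.Str.lower p.2) &&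
          ((PySem.Set.ofList (((PySem.List.enumerate sentences).filter
              (fun q => PySem.Str.isIn text2 (PySem.Str.lower q.2))).map Prod.fst)).contains (p.1 - 1) ||
           (PySem.Set.ofList (((PySem.List.enumerate sentences).filter
              (fun q => PySem.Str.isIn text2 (PySem.Str.lower q.2))).map Prod.fst)).contains (p.1 + 1))) := by
  rw [are_adjacent_py_alt]
  rw [List.any_map, List.any_filter]
  rfl

-- ===== VERDICT (by name: the statement is the Claim_ definition above) =====
theorem are_adjacent_py_spec : Claim_equal_are_adjacent_py := by
  intro text1 text2 sentences _
  unfold Spec_are_adjacent_py are_adjacent_py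
  rw [alt_eq]
  exact goA_eq text1 text2 sentences sentences 0 (by simp)
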